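-- pv_equiv track=rewrite | github.com/JohnMcFarland/OpenCTI-Connectors | report_model_qa/src/connector.py | verdict_from
-- ===== SOURCE A (Python) =====
-- from typing import Any, Dict, List, Optional
--
-- def verdict_from(findings: List[Dict[str, Any]], fail_on_blockers: bool) -> str:
--     if fail_on_blockers:
--         for f in findings:
--             if (f.get("severity") or "").upper() == "BLOCKER":
--                 return "FAIL"
--     for f in findings:
--         if (f.get("severity") or "").upper() == "ERROR":
--             return "FAIL"
--     return "PASS"
-- ===== SOURCE B (Python) =====
-- def verdict_from(findings, fail_on_blockers):
--     # Precompute the failing severity set from the flag, then make ONE pass with any().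
--     bad = {"ERROR", "BLOCKER"} if fail_on_blockers else {"ERROR"}
--     return "FAIL" if any((f.get("severity") or "").upper() in bad
--                          for f in findings) else "PASS"
-- ===== Notes on version B (the rewrite author's own statement) =====
-- stated objective: simpler
-- what changed: A makes two staged early-exit scans (blockers, then errors); B first derives the set of failing severities from the flag and then decides with a single any() pass testing each finding's severity against that set.
import Mathlib
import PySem

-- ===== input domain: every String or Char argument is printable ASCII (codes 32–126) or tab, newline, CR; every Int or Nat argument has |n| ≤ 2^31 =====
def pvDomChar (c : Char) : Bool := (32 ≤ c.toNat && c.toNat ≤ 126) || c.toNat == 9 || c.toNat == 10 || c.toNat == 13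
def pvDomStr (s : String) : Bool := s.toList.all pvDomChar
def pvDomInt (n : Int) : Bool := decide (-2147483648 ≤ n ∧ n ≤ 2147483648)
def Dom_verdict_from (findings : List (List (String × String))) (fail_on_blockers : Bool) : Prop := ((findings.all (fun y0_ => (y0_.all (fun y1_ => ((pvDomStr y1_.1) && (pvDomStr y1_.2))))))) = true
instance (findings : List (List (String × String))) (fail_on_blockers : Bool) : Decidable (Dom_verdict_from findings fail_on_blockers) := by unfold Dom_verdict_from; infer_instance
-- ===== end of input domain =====

-- B derives the failing-severity set from the flag, then decides with one any-pass; same return value as A.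
-- ===== PORT A =====
-- (f.get("severity") or "").upper() — "" if the key is missing (an empty value uppercases to "" anyway)
def sevOf (f : List (String × String)) : String :=
  PySem.Str.upper ((PySem.Dict.get? (PySem.Dict.mk f) "severity").getD "")

-- first for-loop of A: early return "FAIL" on a BLOCKER severity
def blockerScan : List (List (String × String)) → Option String
  | [] => none
  | f :: rest => if sevOf f == "BLOCKER" then some "FAIL" else blockerScan rest

-- second for-loop of A: early return "FAIL" on an ERROR severity
def errorScan : List (List (String × String)) → Option String
  | [] => none
  | f :: rest => if sevOf f == "ERROR" then some "FAIL" else errorScan rest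

def verdict_from (findings : List (List (String × String))) (fail_on_blockers : Bool) : String :=
  match (if fail_on_blockers then blockerScan findings else none) with
  | some r => r
  | none =>
    match errorScan findings with
    | some r => r
    | none => "PASS"

-- ===== PORT B =====
def verdict_from_alt (findings : List (List (String × String))) (fail_on_blockers : Bool) : String :=
  let bad : PySem.Set String :=
    if fail_on_blockers then PySem.Set.ofList ["ERROR", "BLOCKER"] else PySem.Set.ofList ["ERROR"]
  if findings.any (fun f => PySem.Set.contains bad (sevOf f)) then "FAIL" else "PASS"

-- ===== PRECONDITION & SPEC =====
def Spec_verdict_from (findings : List (List (String × String))) (fail_on_blockers : Bool) (out : String) : Prop := out = verdict_from_alt findings fail_on_blockers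
instance (findings : List (List (String × String))) (fail_on_blockers : Bool) (out : String) : Decidable (Spec_verdict_from findings fail_on_blockers out) := by unfold Spec_verdict_from; infer_instance

-- ===== CLAIM (what is proved, stated in full; the proofs are below) =====
def Claim_equal_verdict_from : Prop := ∀ (findings : List (List (String × String))) (fail_on_blockers : Bool), Dom_verdict_from findings fail_on_blockers → Spec_verdict_from findings fail_on_blockers (verdict_from findings fail_on_blockers)

-- ===== LEMMAS AND PROOFS =====
-- each scan of A returns some "FAIL" exactly when some finding has the scanned severity
theorem blockerScan_eq (fs : List (List (String × String))) :
    blockerScan fs = if fs.any (fun f => sevOf f == "BLOCKER") then some "FAIL" else none := by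
  induction fs with
  | nil => simp [blockerScan]
  | cons f rest ih =>
    simp only [blockerScan, List.any_cons, ih]
    by_cases h : sevOf f == "BLOCKER" <;> simp [h]

theorem errorScan_eq (fs : List (List (String × String))) :
    errorScan fs = if fs.any (fun f => sevOf f == "ERROR") then some "FAIL" else none := by
  induction fs with
  | nil => simp [errorScan]
  | cons f rest ih =>
    simp only [errorScan, List.any_cons, ih]
    by_cases h : sevOf f == "ERROR" <;> simp [h]

-- membership of a severity in B's precomputed failing set, spelled as the two equality tests
theorem contains_bad (fob : Bool) (s : String) :
    PySem.Set.contains (if fob then PySem.Set.ofList ["ERROR", "BLOCKER"] else PySem.Set.ofList ["ERROR"]) s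
      = (s == "ERROR" || (fob && s == "BLOCKER")) := by
  cases fob <;> simp [PySem.Set.contains, PySem.Set.mem_ofList] <;>
    by_cases h1 : s = "ERROR" <;> by_cases h2 : s = "BLOCKER" <;> simp [h1, h2]

theorem verdict_from_spec : Claim_equal_verdict_from := by
  intro findings fob _
  unfold Spec_verdict_from verdict_from verdict_from_alt
  simp only [blockerScan_eq, errorScan_eq, contains_bad]
  have hany : findings.any (fun f => sevOf f == "ERROR" || (fob && sevOf f == "BLOCKER"))
      = (findings.any (fun f => sevOf f == "ERROR") || fob && findings.any (fun f => sevOf f == "BLOCKER")) := by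
    cases fob
    · simp
    · simp only [Bool.true_and]
      rw [Bool.eq_iff_iff]
      simp only [List.any_eq_true, Bool.or_eq_true]
      constructor
      · rintro ⟨f, hf, h | h⟩
        · exact Or.inl ⟨f, hf, h⟩
        · exact Or.inr ⟨f, hf, h⟩
      · rintro (⟨f, hf, h⟩ | ⟨f, hf, h⟩) <;> exact ⟨f, hf, by simp [h]⟩
  rw [hany]
  cases fob <;>
    cases hb : findings.any (fun f => sevOf f == "BLOCKER") <;>
    cases he : findings.any (fun f => sevOf f == "ERROR") <;>
    simp [hb, he]
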